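-- pv_equiv track=rewrite | github.com/UW-Madison-Lee-Lab/ENTP | rasp/match3_unique.py | causal_match3_unique_true
-- ===== SOURCE A (Python) =====
-- M = 10
--
-- def causal_match3_unique_true(x):
--     n = len(x)
--     i = n - 1
--     for j in range(n - 2):
--         for k in range(j + 1, n - 1):
--             if (x[i] + x[j] + x[k]) % M == 0:
--                 return [1] * n
--
--     return [0] * n
-- ===== SOURCE B (Python) =====
-- M = 10
--
-- def causal_match3_unique_true(x):
--     n = len(x)
--     if n == 0:
--         return []
--     t = (-x[-1]) % M
--     seen = set()
--     for v in x[:-1]: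
--         r = v % M
--         if (t - r) % M in seen:
--             return [1] * n
--         seen.add(r)
--     return [0] * n
-- ===== Notes on version B (the rewrite author's own statement) =====
-- stated objective: faster
-- what changed: Replaced the quadratic double loop over index pairs by a single pass over the first n-1 elements that keeps a set of residues mod 10 already seen and tests the complementary residue of each new element.
import Mathlib
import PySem

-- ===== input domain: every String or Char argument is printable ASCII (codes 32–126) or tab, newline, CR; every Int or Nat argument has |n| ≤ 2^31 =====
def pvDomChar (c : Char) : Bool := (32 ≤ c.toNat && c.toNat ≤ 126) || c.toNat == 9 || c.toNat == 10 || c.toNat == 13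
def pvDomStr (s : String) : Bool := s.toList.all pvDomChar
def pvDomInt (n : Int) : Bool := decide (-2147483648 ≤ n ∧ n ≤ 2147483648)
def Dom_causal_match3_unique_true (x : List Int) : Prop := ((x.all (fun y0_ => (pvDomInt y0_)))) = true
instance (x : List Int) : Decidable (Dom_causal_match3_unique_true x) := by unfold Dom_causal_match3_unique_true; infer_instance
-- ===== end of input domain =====

-- B replaces A's quadratic scan over all index pairs by one pass keeping a set of residues mod 10 (asymptotically faster); same return value on every input.

-- ===== PORT A =====
def causal_match3_unique_true (x : List Int) : List Int :=
  let n : Int := x.length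
  let i : Int := n - 1
  if (PySem.List.pyRange 0 (n - 2) 1).any (fun j =>
       (PySem.List.pyRange (j + 1) (n - 1) 1).any (fun k =>
         PySem.Int.mod (PySem.List.pyGetD x i 0 + PySem.List.pyGetD x j 0 + PySem.List.pyGetD x k 0) 10 == 0))
  then List.replicate x.length 1 else List.replicate x.length 0

-- ===== PORT B =====
-- the 'for v in x[:-1]' loop of Source B, with early return modelled as a Bool result
def altLoop (t : Int) (seen : PySem.Set Int) : List Int → Bool
  | [] => false
  | v :: ys =>
    if PySem.Set.contains seen (PySem.Int.mod (t - PySem.Int.mod v 10) 10) then true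
    else altLoop t (PySem.Set.add seen (PySem.Int.mod v 10)) ys

def causal_match3_unique_true_alt (x : List Int) : List Int :=
  if x.length = 0 then []
  else
    let t : Int := PySem.Int.mod (-(PySem.List.pyGetD x (-1) 0)) 10
    if altLoop t PySem.Set.empty (PySem.List.slice x none (some (-1)))
    then List.replicate x.length 1 else List.replicate x.length 0

-- ===== PRECONDITION & SPEC =====
def Spec_causal_match3_unique_true (x : List Int) (out : List Int) : Prop := out = causal_match3_unique_true_alt x
instance (x : List Int) (out : List Int) : Decidable (Spec_causal_match3_unique_true x out) := by unfold Spec_causal_match3_unique_true; infer_instance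

-- ===== CLAIM (what is proved, stated in full; the proofs are below) =====
def Claim_equal_causal_match3_unique_true : Prop := ∀ (x : List Int), Dom_causal_match3_unique_true x → Spec_causal_match3_unique_true x (causal_match3_unique_true x)

-- ===== LEMMAS AND PROOFS =====

-- characterization of altLoop: a pair (earlier element u, current element v) fires the key test
lemma altLoop_iff (t : Int) (seen : PySem.Set Int) (y : List Int) :
    altLoop t seen y = true ↔
      ∃ a v b, y = a ++ v :: b ∧
        (PySem.Int.mod (t - PySem.Int.mod v 10) 10 ∈ seen ∨
         ∃ u ∈ a, PySem.Int.mod (t - PySem.Int.mod v 10) 10 = PySem.Int.mod u 10) := by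
  induction y generalizing seen with
  | nil =>
    simp [altLoop]
  | cons v ys ih =>
    simp only [altLoop]
    by_cases hc : PySem.Set.contains seen (PySem.Int.mod (t - PySem.Int.mod v 10) 10) = true
    · rw [if_pos hc]
      simp only [true_iff]
      exact ⟨[], v, ys, rfl, Or.inl ((PySem.Set.contains_iff _ _).mp hc)⟩
    · rw [if_neg hc, ih]
      constructor
      · rintro ⟨a, w, b, rfl, h⟩
        refine ⟨v :: a, w, b, rfl, ?_⟩
        rcases h with h | ⟨u, hu, he⟩
        · rw [PySem.Set.mem_add] at h
          rcases h with h | h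
          · exact Or.inl h
          · exact Or.inr ⟨v, List.mem_cons_self, h⟩
        · exact Or.inr ⟨u, List.mem_cons_of_mem _ hu, he⟩
      · rintro ⟨a, w, b, he, h⟩
        cases a with
        | nil =>
          simp only [List.nil_append, List.cons.injEq] at he
          obtain ⟨rfl, rfl⟩ := he
          rcases h with h | ⟨u, hu, _⟩
          · exact absurd ((PySem.Set.contains_iff _ _).mpr h) hc
          · simp at hu
        | cons a0 a' =>
          simp only [List.cons_append, List.cons.injEq] at he
          obtain ⟨rfl, rfl⟩ := he
          refine ⟨a', w, b, rfl, ?_⟩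
          rcases h with h | ⟨u, hu, heq⟩
          · exact Or.inl (by rw [PySem.Set.mem_add]; exact Or.inl h)
          · rcases List.mem_cons.mp hu with rfl | hu
            · exact Or.inl (by rw [PySem.Set.mem_add]; exact Or.inr heq)
            · exact Or.inr ⟨u, hu, heq⟩

-- split form over a list ↔ index-pair form
lemma split_pair_iff (y : List Int) (C : Int → Int → Prop) :
    (∃ a v b, y = a ++ v :: b ∧ ∃ u ∈ a, C u v) ↔
      ∃ (i j : ℕ), ∃ hj : j < y.length, ∃ _ : i < j, C (y[i]'(by omega)) (y[j]'hj) := by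
  constructor
  · rintro ⟨a, v, b, rfl, u, hu, hC⟩
    obtain ⟨i, hi, rfl⟩ := List.mem_iff_getElem.mp hu
    refine ⟨i, a.length, by simp, hi, ?_⟩
    have h1 : (a ++ v :: b)[i]'(by simp; omega) = a[i]'hi := List.getElem_append_left hi
    have h2 : (a ++ v :: b)[a.length]'(by simp) = v := by
      rw [List.getElem_append_right (Nat.le_refl _)]
      simp
    rw [h1, h2]
    exact hC
  · rintro ⟨i, j, hj, hij, hC⟩
    refine ⟨y.take j, y[j]'hj, y.drop (j + 1), ?_, y[i]'(by omega), ?_, ?_⟩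
    · conv_lhs => rw [← List.take_append_drop j y]
      rw [List.drop_eq_getElem_cons hj]
    · rw [List.mem_iff_getElem]
      refine ⟨i, ?_, ?_⟩
      · simp only [List.length_take]
        omega
      · exact List.getElem_take
    · exact hC

-- the shared arithmetic: the residue-key test equals the three-sum test (mod 10)
lemma key_arith (L u v : Int) :
    PySem.Int.mod (PySem.Int.mod (-L) 10 - PySem.Int.mod v 10) 10 = PySem.Int.mod u 10 ↔
      PySem.Int.mod (L + u + v) 10 = 0 := by
  have h : ∀ a : Int, PySem.Int.mod a 10 = a % 10 :=
    fun a => PySem.Int.mod_eq_emod_of_pos (by norm_num)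
  simp only [h]
  omega

-- A's double range scan in index form
lemma bA_iff (x : List Int) :
    ((PySem.List.pyRange 0 ((x.length : Int) - 2) 1).any (fun j =>
       (PySem.List.pyRange (j + 1) ((x.length : Int) - 1) 1).any (fun k =>
         PySem.Int.mod (PySem.List.pyGetD x ((x.length : Int) - 1) 0 + PySem.List.pyGetD x j 0 + PySem.List.pyGetD x k 0) 10 == 0)) = true) ↔
      ∃ j k : Int, 0 ≤ j ∧ j < k ∧ k < (x.length : Int) - 1 ∧
        PySem.Int.mod (PySem.List.pyGetD x ((x.length : Int) - 1) 0 + PySem.List.pyGetD x j 0 + PySem.List.pyGetD x k 0) 10 = 0 := by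
  simp only [List.any_eq_true, PySem.List.mem_pyRange_one, beq_iff_eq]
  constructor
  · rintro ⟨j, ⟨hj0, _⟩, k, ⟨hjk, hk⟩, hC⟩
    exact ⟨j, k, hj0, by omega, hk, hC⟩
  · rintro ⟨j, k, hj0, hjk, hk, hC⟩
    exact ⟨j, ⟨hj0, by omega⟩, k, ⟨by omega, hk⟩, hC⟩

-- x-indexing (pyGetD) through dropLast: indices below length-1 read the same elements
lemma pyGetD_dropLast (x : List Int) (j : Int) (h0 : 0 ≤ j) (h1 : j < (x.length : Int) - 1) :
    PySem.List.pyGetD x j 0 = x.dropLast[j.toNat]'(by rw [List.length_dropLast]; omega) := by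
  rw [PySem.List.pyGetD_eq_getElem x 0 h0 (by omega)]
  exact (List.getElem_dropLast _).symm

lemma last_eq (x : List Int) (hx : x ≠ []) :
    PySem.List.pyGetD x (-1) 0 = PySem.List.pyGetD x ((x.length : Int) - 1) 0 := by
  have hlen : 0 < x.length := List.length_pos_iff.mpr hx
  rw [PySem.List.pyGetD_neg_one x 0 hx,
      PySem.List.pyGetD_eq_getElem x 0 (by omega) (by omega),
      List.getLast_eq_getElem]
  have ht : ((x.length : Int) - 1).toNat = x.length - 1 := by omega
  simp only [ht]

-- ===== VERDICT (by name: the statement is the Claim_ definition above) =====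
theorem causal_match3_unique_true_spec : Claim_equal_causal_match3_unique_true := by
  intro x _
  unfold Spec_causal_match3_unique_true
  by_cases hx : x = []
  · subst hx; decide
  · have hlen : 0 < x.length := List.length_pos_iff.mpr hx
    have hA : causal_match3_unique_true x =
        (if ((PySem.List.pyRange 0 ((x.length : Int) - 2) 1).any (fun j =>
            (PySem.List.pyRange (j + 1) ((x.length : Int) - 1) 1).any (fun k =>
              PySem.Int.mod (PySem.List.pyGetD x ((x.length : Int) - 1) 0 + PySem.List.pyGetD x j 0 + PySem.List.pyGetD x k 0) 10 == 0)))
         then List.replicate x.length 1 else List.replicate x.length 0) := rfl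
    have hB : causal_match3_unique_true_alt x =
        (if x.length = 0 then []
         else if altLoop (PySem.Int.mod (-(PySem.List.pyGetD x (-1) 0)) 10) PySem.Set.empty (PySem.List.slice x none (some (-1)))
         then List.replicate x.length 1 else List.replicate x.length 0) := rfl
    rw [hA, hB, if_neg (show ¬ x.length = 0 by omega), PySem.List.slice_to_neg_one]
    have hbool :
        ((PySem.List.pyRange 0 ((x.length : Int) - 2) 1).any (fun j =>
          (PySem.List.pyRange (j + 1) ((x.length : Int) - 1) 1).any (fun k =>
            PySem.Int.mod (PySem.List.pyGetD x ((x.length : Int) - 1) 0 + PySem.List.pyGetD x j 0 + PySem.List.pyGetD x k 0) 10 == 0)))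
        = altLoop (PySem.Int.mod (-(PySem.List.pyGetD x (-1) 0)) 10) PySem.Set.empty x.dropLast := by
      set L := PySem.List.pyGetD x ((x.length : Int) - 1) 0 with hL
      rw [Bool.eq_iff_iff, bA_iff, altLoop_iff, last_eq x hx, ← hL]
      constructor
      · rintro ⟨j, k, hj0, hjk, hk, hC⟩
        rw [pyGetD_dropLast x j hj0 (by omega), pyGetD_dropLast x k (by omega) hk] at hC
        have := (split_pair_iff x.dropLast
          (fun u v => PySem.Int.mod (PySem.Int.mod (-L) 10 - PySem.Int.mod v 10) 10 = PySem.Int.mod u 10)).mpr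
          ⟨j.toNat, k.toNat, by rw [List.length_dropLast]; omega, by omega,
            (key_arith L _ _).mpr hC⟩
        obtain ⟨a, v, b, he, u, hu, hC'⟩ := this
        exact ⟨a, v, b, he, Or.inr ⟨u, hu, hC'⟩⟩
      · rintro ⟨a, v, b, he, h⟩
        rcases h with h | ⟨u, hu, hC⟩
        · simp [PySem.Set.empty] at h
        · obtain ⟨i, j, hj, hij, hC'⟩ := (split_pair_iff x.dropLast
            (fun u v => PySem.Int.mod (PySem.Int.mod (-L) 10 - PySem.Int.mod v 10) 10 = PySem.Int.mod u 10)).mp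
            ⟨a, v, b, he, u, hu, hC⟩
          have hjlen : (j : Int) < (x.length : Int) - 1 := by
            rw [List.length_dropLast] at hj
            omega
          refine ⟨(i : Int), (j : Int), by omega, by exact_mod_cast hij, hjlen, ?_⟩
          rw [pyGetD_dropLast x i (by omega) (by omega), pyGetD_dropLast x j (by omega) hjlen]
          have hv := (key_arith L (x.dropLast[i]'(by omega)) (x.dropLast[j]'hj)).mp hC'
          simpa using hv
    rw [hbool]
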